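-- pv_equiv track=rewrite | github.com/aash-gates/Hacker_Ranker_Sol-Nonpro | Climbing the Leaderboard.py | compute_sums
-- ===== SOURCE A (Python) =====
-- def compute_sums(A, B):
--     i = 0
--     y = A[i]
--     s = 0
--
--     result = {}
--     for x in B:
--         while x > y:
--             result[y] = s
--             i += 1
--             if i >= len(A):
--                 return result
--
--             y = A[i]
--         s += 1
--     for y in A[i:]:
--         result[y] = s
--     return result
-- ===== SOURCE B (Python) =====
-- def compute_sums(A, B):
--     j = 0
--     n = len(B)
--     result = {}
--     for y in A:
--         while j < n and B[j] <= y: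
--             j += 1
--         result[y] = j
--     return result
-- ===== Notes on version B (the rewrite author's own statement) =====
-- stated objective: simpler
-- what changed: B inverts the two-pointer decomposition: it loops over A with one monotone pointer advancing through B, replacing A's outer loop over B with its nested while, early return, and trailing flush loop by a single uniform pass.
import Mathlib
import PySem

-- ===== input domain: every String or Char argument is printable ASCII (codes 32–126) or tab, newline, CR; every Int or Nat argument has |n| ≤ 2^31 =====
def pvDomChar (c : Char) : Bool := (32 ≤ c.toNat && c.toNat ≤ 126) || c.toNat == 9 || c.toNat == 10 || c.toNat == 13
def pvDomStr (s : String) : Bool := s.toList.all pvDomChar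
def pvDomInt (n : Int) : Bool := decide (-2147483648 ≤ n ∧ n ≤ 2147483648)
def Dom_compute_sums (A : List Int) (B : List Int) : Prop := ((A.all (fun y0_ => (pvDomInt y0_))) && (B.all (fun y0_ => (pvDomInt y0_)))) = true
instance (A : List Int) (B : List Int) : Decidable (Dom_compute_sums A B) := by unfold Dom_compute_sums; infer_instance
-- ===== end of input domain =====

-- B mirrors A's two-pointer walk: the outer loop runs over A with one monotone pointer into B,
-- replacing A's outer-loop-over-B with nested while, early return and trailing flush loop (objective: simpler).

-- ===== PORT A =====
-- A's inner `while x > y` loop: inserts result[y]=s and advances i; `Sum.inr` is the early `return result`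
def csAWhile (A : List Int) (x : Int) (i : Nat) (y : Int) (s : Nat) (r : PySem.Dict Int Int) :
    (Nat × Int × PySem.Dict Int Int) ⊕ PySem.Dict Int Int :=
  if x > y then
    let r' := r.insert y (s : Int)
    if h : i + 1 ≥ A.length then Sum.inr r'
    else csAWhile A x (i + 1) (A[i + 1]'(by omega)) s r'
  else Sum.inl (i, y, r)
termination_by A.length - i

-- A's `for x in B` loop; on normal exit the trailing `for y in A[i:]: result[y] = s` flush
def csALoop (A : List Int) (bs : List Int) (i : Nat) (y : Int) (s : Nat) (r : PySem.Dict Int Int) :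
    PySem.Dict Int Int :=
  match bs with
  | [] => (A.drop i).foldl (fun r y => r.insert y (s : Int)) r
  | x :: bs' =>
    match csAWhile A x i y s r with
    | Sum.inr r' => r'
    | Sum.inl (i', y', r') => csALoop A bs' i' y' (s + 1) r'

def compute_sums (A : List Int) (B : List Int) : List (Int × Int) :=
  match A with
  | [] => []   -- `y = A[0]` raises IndexError here; excluded by Pre_
  | a0 :: _ => (csALoop A B 0 a0 0 PySem.Dict.empty).items

-- ===== PORT B =====
-- B's `while j < n and B[j] <= y: j += 1`
def csBAdv (B : List Int) (y : Int) (j : Nat) : Nat :=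
  if h : j < B.length then
    if B[j] ≤ y then csBAdv B y (j + 1) else j
  else j
termination_by B.length - j

-- B's `for y in A` loop
def csBLoop (B : List Int) (as : List Int) (j : Nat) (r : PySem.Dict Int Int) : PySem.Dict Int Int :=
  match as with
  | [] => r
  | y :: as' =>
    let j' := csBAdv B y j
    csBLoop B as' j' (r.insert y (j' : Int))

def compute_sums_alt (A : List Int) (B : List Int) : List (Int × Int) :=
  (csBLoop B A 0 PySem.Dict.empty).items

-- ===== PRECONDITION & SPEC =====
-- Pre_ excludes only empty A, on which Python A raises IndexError at `y = A[0]`.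
def Pre_compute_sums (A : List Int) (B : List Int) : Prop := A ≠ []
instance (A : List Int) (B : List Int) : Decidable (Pre_compute_sums A B) := by
  unfold Pre_compute_sums; infer_instance
def pvWitness_compute_sums : List Int × List Int := ([1, 3, 2], [2, 2, 5])

def Spec_compute_sums (A : List Int) (B : List Int) (out : List (Int × Int)) : Prop :=
  out = compute_sums_alt A B
instance (A : List Int) (B : List Int) (out : List (Int × Int)) : Decidable (Spec_compute_sums A B out) := by
  unfold Spec_compute_sums; infer_instance

-- ===== CLAIM (what is proved, stated in full; the proofs are below) =====
def Claim_equal_compute_sums : Prop := ∀ (A : List Int) (B : List Int), Dom_compute_sums A B → Pre_compute_sums A B → Spec_compute_sums A B (compute_sums A B)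

-- ===== LEMMAS AND PROOFS =====

lemma csBAdv_of_len_le (B : List Int) (y : Int) (j : Nat) (h : B.length ≤ j) :
    csBAdv B y j = j := by
  unfold csBAdv; rw [dif_neg (by omega)]

lemma csBAdv_of_gt (B : List Int) (y : Int) (j : Nat) (hj : j < B.length)
    (hx : y < B[j]) : csBAdv B y j = j := by
  unfold csBAdv; rw [dif_pos hj, if_neg (by omega)]

lemma csBAdv_of_le (B : List Int) (y : Int) (j : Nat) (hj : j < B.length)
    (hx : B[j] ≤ y) : csBAdv B y j = csBAdv B y (j + 1) := by
  conv_lhs => unfold csBAdv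
  rw [dif_pos hj, if_pos hx]

lemma csBLoop_of_len_le (B : List Int) (as : List Int) (j : Nat) (r : PySem.Dict Int Int)
    (h : B.length ≤ j) :
    csBLoop B as j r = as.foldl (fun r y => r.insert y (j : Int)) r := by
  induction as generalizing r with
  | nil => simp [csBLoop]
  | cons y as' ih => simp [csBLoop, csBAdv_of_len_le B y j h, ih]

lemma csMain (A B : List Int) (n : Nat) :
    ∀ (i j : Nat) (r : PySem.Dict Int Int) (hi : i < A.length),
      A.length - i + (B.length - j) ≤ n →
      csALoop A (B.drop j) i (A[i]'hi) j r = csBLoop B (A.drop i) j r := by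
  induction n with
  | zero => intro i j r hi hn; omega
  | succ n ih =>
    intro i j r hi hn
    by_cases hj : j < B.length
    · have hdropB : B.drop j = B[j] :: B.drop (j + 1) := (List.getElem_cons_drop hj).symm
      have hdropA : A.drop i = A[i] :: A.drop (i + 1) := (List.getElem_cons_drop hi).symm
      rw [hdropB]
      by_cases hx : A[i] < B[j]
      · -- inner while fires: result[y] = s, i advances
        by_cases hend : i + 1 ≥ A.length
        · -- early return; B-side has exactly one A element left
          have hA1 : A.drop (i + 1) = [] := List.drop_eq_nil_of_le (by omega)
          rw [hdropA]
          simp only [csALoop, csBLoop]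
          conv_lhs => unfold csAWhile
          rw [if_pos hx, dif_pos hend]
          rw [csBAdv_of_gt B A[i] j hj hx, hA1]
          simp [csBLoop]
        · have hi' : i + 1 < A.length := by omega
          have step : csALoop A (B[j] :: B.drop (j + 1)) i A[i] j r
              = csALoop A (B[j] :: B.drop (j + 1)) (i + 1) (A[i + 1]'hi') j
                  (r.insert A[i] (j : Int)) := by
            simp only [csALoop]
            conv_lhs => unfold csAWhile
            rw [if_pos hx, dif_neg hend]
          rw [step, ← hdropB, ih (i + 1) j (r.insert A[i] (j : Int)) hi' (by omega)]
          rw [hdropA]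
          simp only [csBLoop]
          rw [csBAdv_of_gt B A[i] j hj hx]
      · -- x <= y: s advances
        have hx' : B[j] ≤ A[i] := by omega
        have step : csALoop A (B[j] :: B.drop (j + 1)) i A[i] j r
            = csALoop A (B.drop (j + 1)) i A[i] (j + 1) r := by
          simp only [csALoop]
          conv_lhs => unfold csAWhile
          rw [if_neg (by omega)]
        rw [step, ih i (j + 1) r hi (by omega)]
        conv_rhs => rw [hdropA]
        rw [hdropA]
        simp only [csBLoop]
        rw [csBAdv_of_le B A[i] j hj hx']
    · -- B exhausted: A flushes the tail, B's while never fires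
      have hB : B.drop j = [] := List.drop_eq_nil_of_le (by omega)
      rw [hB]
      simp only [csALoop]
      rw [csBLoop_of_len_le B (A.drop i) j r (by omega)]

-- ===== VERDICT (by name: the statement is the Claim_ definition above) =====
theorem compute_sums_spec : Claim_equal_compute_sums := by
  intro A B _ hpre
  unfold Spec_compute_sums compute_sums compute_sums_alt
  match A, hpre with
  | a0 :: rest, _ =>
    have h0 : 0 < (a0 :: rest).length := by simp
    have := csMain (a0 :: rest) B ((a0 :: rest).length + B.length) 0 0 PySem.Dict.empty h0 (by omega)
    have h2 : csALoop (a0 :: rest) B 0 a0 0 PySem.Dict.empty = csBLoop B (a0 :: rest) 0 PySem.Dict.empty := by simpa using this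
    show (csALoop (a0 :: rest) B 0 a0 0 PySem.Dict.empty).items = _
    exact congrArg PySem.Dict.items h2
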